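-- pv_equiv track=rewrite | github.com/aryan01104/nl2protocol | nl2protocol/extraction/extractor.py | _expand_well_range
-- ===== SOURCE A (Python) =====
-- def _expand_well_range(start: str, end: str) -> set:
--     """Expand a well range like A1-A12 or A1-H1 to a full set."""
--     start_row, start_col = start[0], int(start[1:])
--     end_row, end_col = end[0], int(end[1:])
--
--     wells = set()
--     if start_row == end_row:
--         # Same row, column range: A1-A12
--         lo, hi = min(start_col, end_col), max(start_col, end_col)
--         for c in range(lo, hi + 1):
--             wells.add(f"{start_row}{c}")
--     elif start_col == end_col:
--         # Same column, row range: A1-H1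
--         lo, hi = min(ord(start_row), ord(end_row)), max(ord(start_row), ord(end_row))
--         for r in range(lo, hi + 1):
--             wells.add(f"{chr(r)}{start_col}")
--     else:
--         # Block: rectangle from (min_row, min_col) to (max_row, max_col)
--         r_lo, r_hi = min(ord(start_row), ord(end_row)), max(ord(start_row), ord(end_row))
--         c_lo, c_hi = min(start_col, end_col), max(start_col, end_col)
--         for r in range(r_lo, r_hi + 1):
--             for c in range(c_lo, c_hi + 1):
--                 wells.add(f"{chr(r)}{c}")
--     return wells
-- ===== SOURCE B (Python) =====
-- def _expand_well_range(start: str, end: str) -> set: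
--     """Expand a well range like A1-A12, A1-H1 or A1-H12 to a full set.
--
--     Single flat loop: every range is a (possibly degenerate) rectangle of
--     n_rows x n_cols cells, so we walk one flat index k over the total cell
--     count and recover (row, col) with divmod -- no case split, no nested loops.
--     """
--     r_lo = min(ord(start[0]), ord(end[0]))
--     r_hi = max(ord(start[0]), ord(end[0]))
--     c_lo = min(int(start[1:]), int(end[1:]))
--     c_hi = max(int(start[1:]), int(end[1:]))
--     n_cols = c_hi - c_lo + 1
--     total = (r_hi - r_lo + 1) * n_cols
--     wells = set()
--     for k in range(total):
--         r, c = divmod(k, n_cols)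
--         wells.add(f"{chr(r_lo + r)}{c_lo + c}")
--     return wells
-- ===== Notes on version B (the rewrite author's own statement) =====
-- stated objective: simpler
-- what changed: Replaces the three-way branch with nested per-row/per-column loops by one flat loop over the total cell count of the (possibly degenerate) rectangle, recovering each (row, column) from the flat index with divmod.
import Mathlib
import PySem

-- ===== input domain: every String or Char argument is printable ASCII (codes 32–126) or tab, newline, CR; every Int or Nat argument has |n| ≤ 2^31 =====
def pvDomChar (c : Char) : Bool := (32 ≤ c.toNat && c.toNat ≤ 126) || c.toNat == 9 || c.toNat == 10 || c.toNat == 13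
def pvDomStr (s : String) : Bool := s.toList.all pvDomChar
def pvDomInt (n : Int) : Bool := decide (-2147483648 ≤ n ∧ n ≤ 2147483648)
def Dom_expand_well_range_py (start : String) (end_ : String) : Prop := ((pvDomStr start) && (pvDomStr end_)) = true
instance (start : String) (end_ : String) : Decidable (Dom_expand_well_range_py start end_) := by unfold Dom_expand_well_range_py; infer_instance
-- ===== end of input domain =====

-- B drops A's three-way same-row/same-column/block branching and its nested loops:
-- it walks ONE flat index over the rectangle's cell count, recovering (row, col)
-- from the index with divmod; same returned set.

-- ===== PORT A =====
def expand_well_range_py (start : String) (end_ : String) : List String :=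
  match PySem.Str.pyGet? start 0, PySem.Int.ofStr? (PySem.Str.slice start (some 1) none),
        PySem.Str.pyGet? end_ 0, PySem.Int.ofStr? (PySem.Str.slice end_ (some 1) none) with
  | some start_row, some start_col, some end_row, some end_col =>
      if start_row == end_row then
        -- same row, column range
        (PySem.List.pyRange (min start_col end_col) (max start_col end_col + 1) 1).foldl
          (fun wells c => PySem.Set.add wells (String.ofList (start_row :: PySem.Int.toChars c))) PySem.Set.empty
      else if start_col == end_col then
        -- same column, row range
        (PySem.List.pyRange (min (start_row.toNat : Int) (end_row.toNat : Int))
            (max (start_row.toNat : Int) (end_row.toNat : Int) + 1) 1).foldl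
          (fun wells r => PySem.Set.add wells (String.ofList (Char.ofNat r.toNat :: PySem.Int.toChars start_col))) PySem.Set.empty
      else
        -- block rectangle
        (PySem.List.pyRange (min (start_row.toNat : Int) (end_row.toNat : Int))
            (max (start_row.toNat : Int) (end_row.toNat : Int) + 1) 1).foldl
          (fun wells r =>
            (PySem.List.pyRange (min start_col end_col) (max start_col end_col + 1) 1).foldl
              (fun wells c => PySem.Set.add wells (String.ofList (Char.ofNat r.toNat :: PySem.Int.toChars c))) wells)
          PySem.Set.empty
  | _, _, _, _ => []    -- start/end empty or non-integer tail: Python raises (outside Pre_)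

-- ===== PORT B =====
-- divmod(k, n_cols) = (floordiv, mod); n_cols ≥ 1 always, where both are exact.
def expand_well_range_py_alt (start : String) (end_ : String) : List String :=
  (((PySem.Str.pyGet? start 0).bind fun s0 =>
    (PySem.Int.ofStr? (PySem.Str.slice start (some 1) none)).bind fun sc =>
    (PySem.Str.pyGet? end_ 0).bind fun e0 =>
    (PySem.Int.ofStr? (PySem.Str.slice end_ (some 1) none)).map fun ec =>
      let r_lo : Int := min (s0.toNat : Int) (e0.toNat : Int)
      let r_hi : Int := max (s0.toNat : Int) (e0.toNat : Int)
      let c_lo : Int := min sc ec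
      let c_hi : Int := max sc ec
      let n_cols : Int := c_hi - c_lo + 1
      let total : Int := (r_hi - r_lo + 1) * n_cols
      (PySem.List.pyRange 0 total 1).foldl
        (fun wells k =>
          PySem.Set.add wells
            (String.ofList (Char.ofNat (r_lo + PySem.Int.floordiv k n_cols).toNat ::
              PySem.Int.toChars (c_lo + PySem.Int.mod k n_cols))))
        PySem.Set.empty).getD [])
    -- parse failure (empty string / non-int tail): Python raises (outside Pre_)

-- ===== PRECONDITION & SPEC =====
-- Pre_: both strings are nonempty and their tails parse as Python ints — exactly where A returns (else IndexError/ValueError).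
def Pre_expand_well_range_py (start : String) (end_ : String) : Prop :=
  (PySem.Str.pyGet? start 0).isSome ∧ (PySem.Int.ofStr? (PySem.Str.slice start (some 1) none)).isSome ∧
  (PySem.Str.pyGet? end_ 0).isSome ∧ (PySem.Int.ofStr? (PySem.Str.slice end_ (some 1) none)).isSome
instance (start : String) (end_ : String) : Decidable (Pre_expand_well_range_py start end_) := by
  unfold Pre_expand_well_range_py; infer_instance

def pvWitness_expand_well_range_py : String × String := ("A1", "C3")

def Spec_expand_well_range_py (start : String) (end_ : String) (out : List String) : Prop := out = expand_well_range_py_alt start end_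
instance (start : String) (end_ : String) (out : List String) : Decidable (Spec_expand_well_range_py start end_ out) := by unfold Spec_expand_well_range_py; infer_instance

-- ===== CLAIM (what is proved, stated in full; the proofs are below) =====
def Claim_equal_expand_well_range_py : Prop := ∀ (start : String) (end_ : String), Dom_expand_well_range_py start end_ → Pre_expand_well_range_py start end_ → Spec_expand_well_range_py start end_ (expand_well_range_py start end_)

-- ===== LEMMAS AND PROOFS =====

-- flat enumeration of a Nat rectangle equals the nested (row-major) enumeration
theorem range_mul_flat {α : Type} (g : Nat → Nat → α) :
    ∀ (nr nc : Nat),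
      (List.range (nr * nc)).map (fun k => g (k / nc) (k % nc))
        = (List.range nr).flatMap (fun r => (List.range nc).map (fun c => g r c)) := by
  intro nr nc
  induction nr with
  | zero => simp
  | succ n ih =>
      rcases Nat.eq_zero_or_pos nc with h0 | hpos
      · simp [h0]
      · rw [Nat.succ_mul, List.range_add, List.map_append, ih,
            List.range_succ, List.flatMap_append]
        congr 1
        · simp only [List.map_map, List.flatMap_cons, List.flatMap_nil, List.append_nil]
          apply List.map_congr_left
          intro c hc
          have hc' : c < nc := List.mem_range.mp hc
          have hd : (n * nc + c) / nc = n := by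
            rw [Nat.add_comm, Nat.add_mul_div_right _ _ hpos, Nat.div_eq_of_lt hc', Nat.zero_add]
          simp [Function.comp, Nat.mod_eq_of_lt hc', hd]

-- the Int-level version, with floordiv/mod on a flat pyRange
theorem flat_eq_nested {α : Type} (g : Int → Int → α) (rlo clo : Int) (nr nc : Nat) :
    (PySem.List.pyRange 0 ((nr : Int) * (nc : Int)) 1).map
        (fun k => g (rlo + PySem.Int.floordiv k (nc : Int)) (clo + PySem.Int.mod k (nc : Int)))
      = (PySem.List.pyRange rlo (rlo + (nr : Int)) 1).flatMap
          (fun r => (PySem.List.pyRange clo (clo + (nc : Int)) 1).map (fun c => g r c)) := by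
  rw [PySem.List.pyRange_one 0, PySem.List.pyRange_one rlo, PySem.List.pyRange_one clo]
  have h1 : (((nr : Int) * (nc : Int)) - 0).toNat = nr * nc := by
    omega
  have h2 : ((rlo + (nr : Int)) - rlo).toNat = nr := by omega
  have h3 : ((clo + (nc : Int)) - clo).toNat = nc := by omega
  rw [h1, h2, h3, List.map_map, List.flatMap_map]
  refine Eq.trans ?_ (Eq.trans (range_mul_flat (fun r c => g (rlo + (r : Int)) (clo + (c : Int))) nr nc) ?_)
  · apply List.map_congr_left; intro k _
    simp [Function.comp, PySem.Int.floordiv_natCast, PySem.Int.mod_natCast]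
  · congr 1
    funext r
    rw [List.map_map]
    rfl

-- a singleton Python range
theorem pyRange_self_succ (a : Int) : PySem.List.pyRange a (a + 1) 1 = [a] := by
  rw [PySem.List.pyRange_one_cons (by omega)]
  simp [PySem.List.pyRange]

-- ===== VERDICT (by name: the statement is the Claim_ definition above) =====
theorem expand_well_range_py_spec : Claim_equal_expand_well_range_py := by
  intro start end_ _ hpre
  obtain ⟨h1, h2, h3, h4⟩ := hpre
  obtain ⟨sr, hsr⟩ := Option.isSome_iff_exists.mp h1
  obtain ⟨sc, hsc⟩ := Option.isSome_iff_exists.mp h2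
  obtain ⟨er, her⟩ := Option.isSome_iff_exists.mp h3
  obtain ⟨ec, hec⟩ := Option.isSome_iff_exists.mp h4
  unfold Spec_expand_well_range_py expand_well_range_py expand_well_range_py_alt
  rw [hsr, hsc, her, hec]
  simp only [Option.bind_some, Option.map_some, Option.getD_some]
  -- name the rectangle bounds
  set rlo : Int := min (sr.toNat : Int) (er.toNat : Int) with hrlo
  set rhi : Int := max (sr.toNat : Int) (er.toNat : Int) with hrhi
  set clo : Int := min sc ec with hclo
  set chi : Int := max sc ec with hchi
  have hrle : rlo ≤ rhi := min_le_max
  have hcle : clo ≤ chi := min_le_max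
  -- B's flat fold = nested fold, via flat_eq_nested with nr/nc as Nats
  have hBnested :
      (PySem.List.pyRange 0 ((rhi - rlo + 1) * (chi - clo + 1)) 1).foldl
        (fun wells k =>
          PySem.Set.add wells
            (String.ofList (Char.ofNat (rlo + PySem.Int.floordiv k (chi - clo + 1)).toNat ::
              PySem.Int.toChars (clo + PySem.Int.mod k (chi - clo + 1)))))
        PySem.Set.empty
      = (PySem.List.pyRange rlo (rhi + 1) 1).foldl
          (fun wells r =>
            (PySem.List.pyRange clo (chi + 1) 1).foldl
              (fun wells c => PySem.Set.add wells (String.ofList (Char.ofNat r.toNat :: PySem.Int.toChars c))) wells)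
          PySem.Set.empty := by
    have hnr : ((rhi - rlo + 1).toNat : Int) = rhi - rlo + 1 := by omega
    have hnc : ((chi - clo + 1).toNat : Int) = chi - clo + 1 := by omega
    have key := flat_eq_nested
      (fun r c => String.ofList (Char.ofNat r.toNat :: PySem.Int.toChars c))
      rlo clo (rhi - rlo + 1).toNat (chi - clo + 1).toNat
    rw [hnr, hnc] at key
    have hr' : rlo + (rhi - rlo + 1) = rhi + 1 := by ring
    have hc' : clo + (chi - clo + 1) = chi + 1 := by ring
    rw [hr', hc'] at key
    calc _ = ((PySem.List.pyRange 0 ((rhi - rlo + 1) * (chi - clo + 1)) 1).map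
              (fun k => String.ofList (Char.ofNat (rlo + PySem.Int.floordiv k (chi - clo + 1)).toNat ::
                PySem.Int.toChars (clo + PySem.Int.mod k (chi - clo + 1))))).foldl
              PySem.Set.add PySem.Set.empty := by rw [List.foldl_map]
      _ = ((PySem.List.pyRange rlo (rhi + 1) 1).flatMap
              (fun r => (PySem.List.pyRange clo (chi + 1) 1).map
                (fun c => String.ofList (Char.ofNat r.toNat :: PySem.Int.toChars c)))).foldl
              PySem.Set.add PySem.Set.empty := by rw [key]
      _ = _ := by
            rw [List.foldl_flatMap]
            have hf : (fun (wells : List String) (r : Int) =>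
                ((PySem.List.pyRange clo (chi + 1) 1).map
                  (fun c => String.ofList (Char.ofNat r.toNat :: PySem.Int.toChars c))).foldl
                  PySem.Set.add wells)
              = (fun (wells : List String) (r : Int) =>
                (PySem.List.pyRange clo (chi + 1) 1).foldl
                  (fun wells c => PySem.Set.add wells (String.ofList (Char.ofNat r.toNat :: PySem.Int.toChars c))) wells) := by
              funext s r; rw [List.foldl_map]
            rw [hf]
  rw [hBnested]
  -- now compare A's branches with the nested rectangle fold
  by_cases hr : sr == er
  · rw [if_pos hr]
    have hre : sr = er := eq_of_beq hr
    subst hre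
    have : rlo = (sr.toNat : Int) := by simp [hrlo]
    have hhi : rhi = (sr.toNat : Int) := by simp [hrhi]
    rw [this, hhi, pyRange_self_succ, List.foldl_cons, List.foldl_nil]
    simp [Char.ofNat_toNat]
  · rw [if_neg hr]
    by_cases hc : sc == ec
    · rw [if_pos hc]
      have hce : sc = ec := eq_of_beq hc
      subst hce
      have hlo : clo = sc := by simp [hclo]
      have hhi : chi = sc := by simp [hchi]
      rw [hlo, hhi]
      have hf : (fun (wells : List String) (r : Int) =>
            PySem.Set.add wells (String.ofList (Char.ofNat r.toNat :: PySem.Int.toChars sc)))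
          = (fun (wells : List String) (r : Int) =>
            (PySem.List.pyRange sc (sc + 1) 1).foldl
              (fun wells c => PySem.Set.add wells (String.ofList (Char.ofNat r.toNat :: PySem.Int.toChars c))) wells) := by
        funext s r; rw [pyRange_self_succ, List.foldl_cons, List.foldl_nil]
      rw [hf]
    · rw [if_neg hc]
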